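-- pv_equiv track=rewrite | github.com/Kritagya21Loomba/F1Chaos | analytics/compute_inversions.py | count_inversions_between
-- ===== SOURCE A (Python) =====
-- def merge_count(arr):
--     """Return (sorted_arr, inversion_count) using merge sort."""
--     if len(arr) <= 1:
--         return arr, 0
--
--     mid = len(arr) // 2
--     left, left_inv = merge_count(arr[:mid])
--     right, right_inv = merge_count(arr[mid:])
--
--     merged = []
--     inversions = left_inv + right_inv
--     i = j = 0
--
--     while i < len(left) and j < len(right):
--         if left[i] <= right[j]:
--             merged.append(left[i])
--             i += 1
--         else:
--             merged.append(right[j])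
--             inversions += len(left) - i
--             j += 1
--
--     merged.extend(left[i:])
--     merged.extend(right[j:])
--     return merged, inversions
--
-- def count_inversions_between(order_a, order_b):
--     """
--     Count inversions between two orderings.
--     Maps order_a elements to indices [0,1,2,...] then checks
--     how many pairs in order_b are out of that relative order.
--     DNF entries are excluded.
--     """
--     a_clean = [d for d in order_a if not d.endswith("_DNF")]
--     b_clean = [d for d in order_b if not d.endswith("_DNF")]
--
--     # Only consider drivers present in both
--     common = [d for d in a_clean if d in b_clean]
--
--     # Map driver to its rank in order_a
--     rank = {d: i for i, d in enumerate(common)}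
--
--     # Get rank sequence as it appears in order_b
--     seq = [rank[d] for d in b_clean if d in rank]
--
--     _, inv = merge_count(seq)
--     return inv
-- ===== SOURCE B (Python) =====
-- def count_inversions_between(order_a, order_b):
--     """
--     Count inversions between two orderings.
--     Maps order_a elements to indices [0,1,2,...] then checks
--     how many pairs in order_b are out of that relative order.
--     DNF entries are excluded.
--     """
--     a_clean = [d for d in order_a if not d.endswith("_DNF")]
--     b_clean = [d for d in order_b if not d.endswith("_DNF")]
--
--     # Only consider drivers present in both
--     common = [d for d in a_clean if d in b_clean]
--
--     # Map driver to its rank in order_a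
--     rank = {d: i for i, d in enumerate(common)}
--
--     # Get rank sequence as it appears in order_b
--     seq = [rank[d] for d in b_clean if d in rank]
--
--     # Direct pair count: an inversion is a pair i < j with seq[i] > seq[j]
--     inv = 0
--     for i, x in enumerate(seq):
--         for y in seq[i + 1:]:
--             if x > y:
--                 inv += 1
--     return inv
-- ===== Notes on version B (the rewrite author's own statement) =====
-- stated objective: simpler
-- what changed: Replaced the recursive merge-sort divide-and-conquer inversion counter (merge_count) by a direct nested-loop count of pairs i<j with seq[i]>seq[j]; preprocessing is unchanged.
import Mathlib
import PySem

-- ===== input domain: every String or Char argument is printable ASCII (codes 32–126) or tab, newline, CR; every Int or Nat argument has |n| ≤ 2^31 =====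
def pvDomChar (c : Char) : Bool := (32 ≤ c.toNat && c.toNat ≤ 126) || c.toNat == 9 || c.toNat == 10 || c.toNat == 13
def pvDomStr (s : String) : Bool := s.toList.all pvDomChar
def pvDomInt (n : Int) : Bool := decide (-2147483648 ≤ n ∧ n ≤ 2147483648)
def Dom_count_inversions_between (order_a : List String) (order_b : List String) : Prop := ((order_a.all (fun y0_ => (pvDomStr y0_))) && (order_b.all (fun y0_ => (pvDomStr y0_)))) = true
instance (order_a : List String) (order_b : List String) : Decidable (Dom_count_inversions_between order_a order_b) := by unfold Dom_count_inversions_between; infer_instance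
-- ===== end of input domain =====

-- B replaces A's merge-sort inversion counter by a direct nested-loop pair count
-- (simpler: no divide-and-conquer helper); preprocessing is identical in both,
-- so both ports share the `buildSeq` helper below.

-- Shared preprocessing (literally identical lines in both Pythons):
-- a_clean, b_clean, common, rank, seq.
def buildSeq (order_a : List String) (order_b : List String) : List Int :=
  let a_clean := order_a.filter (fun d => !(PySem.Str.endswith d "_DNF"))
  let b_clean := order_b.filter (fun d => !(PySem.Str.endswith d "_DNF"))
  let common := a_clean.filter (fun d => b_clean.contains d)
  let rank : PySem.Dict String Int :=
    (PySem.List.enumerate common).foldl (fun r p => r.insert p.2 p.1) PySem.Dict.empty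
  -- [rank[d] for d in b_clean if d in rank]: the guard guarantees the lookup succeeds
  b_clean.filterMap (fun d => rank.get? d)

-- ===== PORT A =====
-- while-loop of merge_count: i/j suffixes of left/right; the two `extend`s are the base cases
def mergeLoop : List Int → List Int → List Int × Int
  | [], right => (right, 0)
  | x :: xs, [] => (x :: xs, 0)
  | x :: xs, y :: ys =>
    if x ≤ y then
      let r := mergeLoop xs (y :: ys)
      (x :: r.1, r.2)
    else
      let r := mergeLoop (x :: xs) ys
      (y :: r.1, r.2 + ((x :: xs).length : Int))

def merge_count (arr : List Int) : List Int × Int :=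
  if _h : arr.length ≤ 1 then (arr, 0)
  else
    let mid := arr.length / 2
    let L := merge_count (arr.take mid)
    let R := merge_count (arr.drop mid)
    let M := mergeLoop L.1 R.1
    (M.1, L.2 + R.2 + M.2)
termination_by arr.length
decreasing_by
  · simp only [List.length_take]; omega
  · simp only [List.length_drop]; omega

def count_inversions_between (order_a : List String) (order_b : List String) : Int :=
  (merge_count (buildSeq order_a order_b)).2

-- ===== PORT B =====
-- for i, x in enumerate(seq): for y in seq[i+1:]: if x > y: inv += 1
def bruteCount : List Int → Int
  | [] => 0
  | x :: xs => ((xs.countP (fun y => decide (y < x)) : Nat) : Int) + bruteCount xs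

def count_inversions_between_alt (order_a : List String) (order_b : List String) : Int :=
  bruteCount (buildSeq order_a order_b)

-- ===== PRECONDITION & SPEC =====
def Spec_count_inversions_between (order_a : List String) (order_b : List String) (out : Int) : Prop := out = count_inversions_between_alt order_a order_b
instance (order_a : List String) (order_b : List String) (out : Int) : Decidable (Spec_count_inversions_between order_a order_b out) := by unfold Spec_count_inversions_between; infer_instance

-- ===== CLAIM (what is proved, stated in full; the proofs are below) =====
def Claim_equal_count_inversions_between : Prop := ∀ (order_a : List String) (order_b : List String), Dom_count_inversions_between order_a order_b → Spec_count_inversions_between order_a order_b (count_inversions_between order_a order_b)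

-- ===== LEMMAS AND PROOFS =====

-- number of inversions, in ℕ
def natInv : List Int → Nat
  | [] => 0
  | x :: xs => xs.countP (fun y => decide (y < x)) + natInv xs

-- cross inversions between two blocks
def crossN (l r : List Int) : Nat := (l.map (fun x => r.countP (fun y => decide (y < x)))).sum

theorem bruteCount_eq_natInv (l : List Int) : bruteCount l = (natInv l : Int) := by
  induction l with
  | nil => simp [bruteCount, natInv]
  | cons x xs ih => simp [bruteCount, natInv, ih]

theorem crossN_cons_right (l : List Int) (y : Int) (r : List Int) :
    crossN l (y :: r) = l.countP (fun x => decide (y < x)) + crossN l r := by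
  induction l with
  | nil => simp [crossN]
  | cons a l ih =>
    simp only [crossN, List.map_cons, List.sum_cons, List.countP_cons] at *
    by_cases h : y < a <;> simp [h] at * <;> omega

theorem natInv_append (l₁ l₂ : List Int) :
    natInv (l₁ ++ l₂) = natInv l₁ + crossN l₁ l₂ + natInv l₂ := by
  induction l₁ with
  | nil => simp [natInv, crossN]
  | cons x l ih =>
    simp only [List.cons_append, natInv, crossN, List.map_cons, List.sum_cons,
      List.countP_append] at *
    omega

theorem crossN_perm_left {l l' : List Int} (h : l.Perm l') (r : List Int) :
    crossN l r = crossN l' r :=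
  (h.map _).sum_eq

theorem crossN_perm_right (l : List Int) {r r' : List Int} (h : r.Perm r') :
    crossN l r = crossN l r' := by
  unfold crossN
  congr 1
  exact List.map_congr_left (fun x _ => h.countP_eq _)

theorem mergeLoop_spec (l r : List Int) (hl : l.Pairwise (· ≤ ·)) (hr : r.Pairwise (· ≤ ·)) :
    (mergeLoop l r).1.Perm (l ++ r) ∧ (mergeLoop l r).1.Pairwise (· ≤ ·) ∧
      (mergeLoop l r).2 = (crossN l r : Int) := by
  fun_induction mergeLoop l r with
  | case1 right =>
    simp [crossN, hr]
  | case2 x xs =>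
    simpa [crossN] using hl
  | case3 x xs y ys hxy rr ih =>
    rcases List.pairwise_cons.mp hl with ⟨hx, hxs⟩
    rcases List.pairwise_cons.mp hr with ⟨hy, hys⟩
    obtain ⟨p, s, c⟩ := ih hxs hr
    refine ⟨?_, ?_, ?_⟩
    · simpa using p.cons x
    · refine List.pairwise_cons.mpr ⟨?_, s⟩
      intro z hz
      have hz' := p.mem_iff.mp hz
      rcases List.mem_append.mp hz' with h1 | h2
      · exact hx z h1
      · rcases List.mem_cons.mp h2 with rfl | h3
        · exact hxy
        · exact le_trans hxy (hy z h3)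
    · have hc0 : (y :: ys).countP (fun z => decide (z < x)) = 0 := by
        rw [List.countP_eq_zero]
        intro z hz
        rcases List.mem_cons.mp hz with rfl | h3
        · simpa using not_lt.mpr hxy
        · simpa using not_lt.mpr (le_trans hxy (hy z h3))
      have he : crossN (x :: xs) (y :: ys) = crossN xs (y :: ys) := by
        simp [crossN, hc0]
      simp only [he]
      exact c
  | case4 x xs y ys hxy rr ih =>
    have hyx : y < x := lt_of_not_ge (by simpa using hxy)
    rcases List.pairwise_cons.mp hl with ⟨hx, _hxs⟩
    rcases List.pairwise_cons.mp hr with ⟨hy, hys⟩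
    obtain ⟨p, s, c⟩ := ih hl hys
    refine ⟨?_, ?_, ?_⟩
    · exact List.Perm.trans (p.cons y) List.perm_middle.symm
    · refine List.pairwise_cons.mpr ⟨?_, s⟩
      intro z hz
      have hz' := p.mem_iff.mp hz
      rcases List.mem_append.mp hz' with h1 | h2
      · rcases List.mem_cons.mp h1 with rfl | h3
        · exact le_of_lt hyx
        · exact le_of_lt (lt_of_lt_of_le hyx (hx z h3))
      · exact hy z h2
    · have hcl : (x :: xs).countP (fun z => decide (y < z)) = (x :: xs).length := by
        rw [List.countP_eq_length]
        intro z hz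
        rcases List.mem_cons.mp hz with rfl | h3
        · simpa using hyx
        · simpa using lt_of_lt_of_le hyx (hx z h3)
      have he : crossN (x :: xs) (y :: ys) = (x :: xs).length + crossN (x :: xs) ys := by
        rw [crossN_cons_right, hcl]
      show (mergeLoop (x :: xs) ys).2 + ((x :: xs).length : Int) = _
      rw [c, he]
      push_cast
      ring

theorem natInv_small {l : List Int} (h : l.length ≤ 1) : natInv l = 0 := by
  match l with
  | [] => rfl
  | [x] => simp [natInv]

theorem merge_count_spec (l : List Int) :
    (merge_count l).1.Perm l ∧ (merge_count l).1.Pairwise (· ≤ ·) ∧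
      (merge_count l).2 = (natInv l : Int) := by
  fun_induction merge_count l with
  | case1 l h =>
    refine ⟨List.Perm.refl l, ?_, by simp [natInv_small h]⟩
    match l, h with
    | [], _ => exact List.Pairwise.nil
    | [x], _ => simp
  | case2 l h mid L R M ihL ihR =>
    obtain ⟨pL, sL, cL⟩ := ihL
    obtain ⟨pR, sR, cR⟩ := ihR
    obtain ⟨pM, sM, cM⟩ := mergeLoop_spec L.1 R.1 sL sR
    refine ⟨?_, sM, ?_⟩
    · exact List.Perm.trans pM (List.Perm.trans (pL.append pR)
        (List.Perm.of_eq (List.take_append_drop mid l)))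
    · have hx : crossN L.1 R.1 = crossN (l.take mid) (l.drop mid) := by
        rw [crossN_perm_left pL, crossN_perm_right _ pR]
      have hninv : natInv l = natInv (l.take mid) + crossN (l.take mid) (l.drop mid)
          + natInv (l.drop mid) := by
        conv_lhs => rw [← List.take_append_drop mid l]
        exact natInv_append _ _
      show L.2 + R.2 + M.2 = _
      rw [cL, cR, cM, hx, hninv]
      push_cast
      ring

-- ===== VERDICT (by name: the statement is the Claim_ definition above) =====
theorem count_inversions_between_spec : Claim_equal_count_inversions_between := by
  intro order_a order_b _
  unfold Spec_count_inversions_between count_inversions_between count_inversions_between_alt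
  rw [(merge_count_spec (buildSeq order_a order_b)).2.2, bruteCount_eq_natInv]
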